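-- pv_equiv track=rewrite | github.com/dianarg/conlang-util | divide_word.py | divide_word
-- ===== SOURCE A (Python) =====
-- vowels = 'aeiouAEIOU'
--
-- def divide_word(word):
--     pieces = []
--     bit = ['', '', '']
--     letter = 0
--     b = 0
--     while letter < len(word):
--         if word[letter] in vowels:
--             if b == 1:
--                 b = 2
--             bit[b] += word[letter]
--         else:
--             if b == 2:  # reading vowels but we saw a consonant, go to next piece
--                 pieces.append(tuple(bit))
--                 start = bit[2]
--                 bit = [start, '', '']
--                 bit[1] += word[letter]
--             else:
--                 bit[1] += word[letter]
--             b = 1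
--         letter += 1
--     pieces.append(tuple(bit))
--     return pieces
-- ===== SOURCE B (Python) =====
-- vowels = 'aeiouAEIOU'
--
-- def divide_word(word):
--     # Parser-style decomposition: repeatedly pull maximal vowel/consonant runs.
--     n = len(word)
--
--     def take(i, want_vowel):
--         j = i
--         while j < n and ((word[j] in vowels) == want_vowel):
--             j += 1
--         return word[i:j], j
--
--     onset, i = take(0, True)
--     pieces = []
--     while True:
--         cons, i = take(i, False)
--         nuc, i = take(i, True)
--         if i == n:
--             pieces.append((onset, cons, nuc))
--             return pieces
--         pieces.append((onset, cons, nuc))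
--         onset = nuc
-- ===== Notes on version B (the rewrite author's own statement) =====
-- stated objective: simpler
-- what changed: Replaced A's per-character state machine (mutable 3-slot bit array plus a 0/1/2 mode flag) with a parser that repeatedly pulls maximal vowel/consonant runs and emits (onset, cluster, nucleus) triples, carrying each nucleus into the next onset.
import Mathlib
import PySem

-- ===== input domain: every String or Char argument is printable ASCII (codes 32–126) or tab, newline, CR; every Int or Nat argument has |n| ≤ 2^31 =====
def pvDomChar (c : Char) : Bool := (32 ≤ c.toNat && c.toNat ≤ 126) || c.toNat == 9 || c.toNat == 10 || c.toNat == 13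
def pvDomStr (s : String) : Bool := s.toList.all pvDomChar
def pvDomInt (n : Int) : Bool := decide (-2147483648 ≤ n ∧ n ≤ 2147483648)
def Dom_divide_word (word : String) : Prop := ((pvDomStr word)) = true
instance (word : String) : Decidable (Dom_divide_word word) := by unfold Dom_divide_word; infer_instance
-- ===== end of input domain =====

-- B re-parses the word as maximal vowel/consonant runs (onset, cluster, nucleus with carry)
-- instead of A's per-character state machine; objective: simpler, same cost.

def vowelsList : List Char := ['a', 'e', 'i', 'o', 'u', 'A', 'E', 'I', 'O', 'U']

def isV (c : Char) : Bool := vowelsList.contains c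

-- ===== PORT A =====
-- state: pieces so far, the three slots of `bit`, and the flag b; returns (pieces, final bit)
def dwA_loop : List Char → List (String × String × String) → List Char → List Char → List Char → Nat →
    List (String × String × String) × (List Char × List Char × List Char)
  | [], pieces, b0, b1, b2, _ => (pieces, (b0, b1, b2))
  | c :: rest, pieces, b0, b1, b2, b =>
    if isV c then
      let b' := if b = 1 then 2 else b          -- if b == 1: b = 2
      if b' = 0 then dwA_loop rest pieces (b0 ++ [c]) b1 b2 b'      -- bit[b] += word[letter]
      else if b' = 1 then dwA_loop rest pieces b0 (b1 ++ [c]) b2 b'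
      else dwA_loop rest pieces b0 b1 (b2 ++ [c]) b'
    else
      if b = 2 then
        -- pieces.append(tuple(bit)); bit = [bit[2], '', '']; bit[1] += word[letter]; b = 1
        dwA_loop rest (pieces ++ [(String.ofList b0, String.ofList b1, String.ofList b2)]) b2 [c] [] 1
      else dwA_loop rest pieces b0 (b1 ++ [c]) b2 1

def divide_word (word : String) : List (String × String × String) :=
  let r := dwA_loop word.toList [] [] [] [] 0
  r.1 ++ [(String.ofList r.2.1, String.ofList r.2.2.1, String.ofList r.2.2.2)]

-- ===== PORT B =====
-- take(s, want_vowel): the maximal prefix of chars whose vowelhood equals want_vowel, and the rest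
def takeB (v : Bool) : List Char → List Char × List Char
  | [] => ([], [])
  | c :: cs =>
    if isV c = v then
      let pr := takeB v cs
      (c :: pr.1, pr.2)
    else ([], c :: cs)

theorem takeB_append (v : Bool) (cs : List Char) : (takeB v cs).1 ++ (takeB v cs).2 = cs := by
  induction cs with
  | nil => simp [takeB]
  | cons c cs ih => by_cases h : isV c = v <;> simp [takeB, h, ih]

theorem takeB_len (v : Bool) (cs : List Char) : (takeB v cs).2.length ≤ cs.length := by
  have := congrArg List.length (takeB_append v cs)
  simp at this; omega

theorem dwB_dec (rest : List Char)
    (h : ¬ (takeB true (takeB false rest).2).2 = []) :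
    (takeB true (takeB false rest).2).2.length < rest.length := by
  match rest with
  | [] => simp [takeB] at h
  | c :: cs =>
    by_cases hv : isV c = false
    · have h1 : (takeB false (c :: cs)).2 = (takeB false cs).2 := by simp [takeB, hv]
      rw [h1]
      have t1 := takeB_len true (takeB false cs).2
      have t2 := takeB_len false cs
      simp; omega
    · have hv' : isV c = true := by revert hv; cases isV c <;> simp
      have h1 : (takeB false (c :: cs)).2 = c :: cs := by simp [takeB, hv']
      rw [h1]
      have h2 : (takeB true (c :: cs)).2 = (takeB true cs).2 := by simp [takeB, hv']
      rw [h2]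
      have t1 := takeB_len true cs
      simp; omega

def dwB_loop (onset : List Char) (rest : List Char) : List (String × String × String) :=
  let cr := takeB false rest        -- cons, rest = take(rest, False)
  let nr := takeB true cr.2         -- nuc, rest = take(rest, True)
  if h : nr.2 = [] then [(String.ofList onset, String.ofList cr.1, String.ofList nr.1)]
  else (String.ofList onset, String.ofList cr.1, String.ofList nr.1) :: dwB_loop nr.1 nr.2
termination_by rest.length
decreasing_by exact dwB_dec rest h

def divide_word_alt (word : String) : List (String × String × String) :=
  let onr := takeB true word.toList     -- onset, rest = take(word, True)
  dwB_loop onr.1 onr.2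

-- ===== PRECONDITION & SPEC =====
def Spec_divide_word (word : String) (out : List (String × String × String)) : Prop := out = divide_word_alt word
instance (word : String) (out : List (String × String × String)) : Decidable (Spec_divide_word word out) := by unfold Spec_divide_word; infer_instance

-- ===== CLAIM (what is proved, stated in full; the proofs are below) =====
def Claim_equal_divide_word : Prop := ∀ (word : String), Dom_divide_word word → Spec_divide_word word (divide_word word)

-- ===== LEMMAS AND PROOFS =====

theorem takeB_fst_all (v : Bool) (cs : List Char) : ∀ c ∈ (takeB v cs).1, isV c = v := by
  induction cs with
  | nil => simp [takeB]
  | cons c cs ih =>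
    by_cases h : isV c = v
    · simp only [takeB, h]
      intro d hd
      rcases List.mem_cons.mp hd with h1 | h1
      · rw [h1]; exact h
      · exact ih d h1
    · simp [takeB, h]

theorem takeB_snd_head (v : Bool) (cs : List Char) (c : Char) (cs' : List Char)
    (h : (takeB v cs).2 = c :: cs') : isV c ≠ v := by
  induction cs with
  | nil => simp [takeB] at h
  | cons d ds ih =>
    by_cases hd : isV d = v
    · simp [takeB, hd] at h; exact ih h
    · simp [takeB, hd] at h; rw [← h.1]; exact hd

theorem takeB_fst_ne (v : Bool) (c : Char) (cs : List Char) (h : isV c = v) :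
    (takeB v (c :: cs)).1 ≠ [] := by simp [takeB, h]

-- A's loop over a run of vowels while b = 0: they all go to slot 0
theorem dwA_vowel0 (p : List Char) (hp : ∀ c ∈ p, isV c = true) :
    ∀ rest pieces b0 b1 b2, dwA_loop (p ++ rest) pieces b0 b1 b2 0 =
      dwA_loop rest pieces (b0 ++ p) b1 b2 0 := by
  induction p with
  | nil => simp
  | cons c p ih =>
    intro rest pieces b0 b1 b2
    have hc : isV c = true := hp c (by simp)
    simp only [List.cons_append, dwA_loop, hc, if_true]
    norm_num
    rw [ih (fun d hd => hp d (by simp [hd]))]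
    simp

-- A's loop over a run of vowels while b = 2: they all go to slot 2
theorem dwA_vowel2 (p : List Char) (hp : ∀ c ∈ p, isV c = true) :
    ∀ rest pieces b0 b1 b2, dwA_loop (p ++ rest) pieces b0 b1 b2 2 =
      dwA_loop rest pieces b0 b1 (b2 ++ p) 2 := by
  induction p with
  | nil => simp
  | cons c p ih =>
    intro rest pieces b0 b1 b2
    have hc : isV c = true := hp c (by simp)
    simp only [List.cons_append, dwA_loop, hc, if_true]
    norm_num
    rw [ih (fun d hd => hp d (by simp [hd]))]
    simp

-- A's loop over a run of consonants while b ≠ 2: they all go to slot 1, flag becomes 1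
theorem dwA_cons (p : List Char) (hp : ∀ c ∈ p, isV c = false) :
    ∀ rest pieces b0 b1 b2 b, b ≠ 2 → dwA_loop (p ++ rest) pieces b0 b1 b2 b =
      dwA_loop rest pieces b0 (b1 ++ p) b2 (if p = [] then b else 1) := by
  induction p with
  | nil => simp
  | cons c p ih =>
    intro rest pieces b0 b1 b2 b hb
    have hc : isV c = false := hp c (by simp)
    simp only [List.cons_append, dwA_loop, hc, Bool.false_eq_true, if_false, hb]
    rw [ih (fun d hd => hp d (by simp [hd])) rest pieces b0 (b1 ++ [c]) b2 1 (by omega)]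
    simp

def dwFinish (r : List (String × String × String) × (List Char × List Char × List Char)) :
    List (String × String × String) :=
  r.1 ++ [(String.ofList r.2.1, String.ofList r.2.2.1, String.ofList r.2.2.2)]

-- Main invariant: from a state where slots 1,2 are empty, b ∈ {0,1}, and the remaining
-- input starts with a consonant (or is empty), A's loop produces B's pieces.
theorem dwA_main : ∀ n rest, rest.length ≤ n → ∀ pieces onset b, (b = 0 ∨ b = 1) →
    (∀ c cs', rest = c :: cs' → isV c = false) →
    dwFinish (dwA_loop rest pieces onset [] [] b) = pieces ++ dwB_loop onset rest := by
  intro n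
  induction n with
  | zero =>
    intro rest hlen pieces onset b _ _
    have : rest = [] := by cases rest <;> simp_all
    subst this
    simp [dwA_loop, dwFinish, dwB_loop, takeB]
  | succ n ih =>
    intro rest hlen pieces onset b hb hhead
    rcases hcons : takeB false rest with ⟨cons, r1⟩
    rcases hnuc : takeB true r1 with ⟨nuc, r2⟩
    have hr : rest = cons ++ r1 := by
      have := takeB_append false rest; rw [hcons] at this; exact this.symm
    have hr1 : r1 = nuc ++ r2 := by
      have := takeB_append true r1; rw [hnuc] at this; exact this.symm
    have hconsall : ∀ c ∈ cons, isV c = false := by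
      intro c hc; have := takeB_fst_all false rest; rw [hcons] at this; exact this c hc
    have hnucall : ∀ c ∈ nuc, isV c = true := by
      intro c hc; have := takeB_fst_all true r1; rw [hnuc] at this; exact this c hc
    have step1 : dwA_loop rest pieces onset [] [] b =
        dwA_loop r1 pieces onset cons [] (if cons = [] then b else 1) := by
      rw [hr]
      have := dwA_cons cons hconsall r1 pieces onset [] [] b (by omega)
      simpa using this
    rcases hr1e : r1 with _ | ⟨v, r1t⟩
    · -- r1 = [] : word ends after the consonant run
      subst hr1e
      have hnuc0 : nuc = [] ∧ r2 = [] := by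
        have : takeB true ([] : List Char) = ([], []) := by simp [takeB]
        rw [this] at hnuc; exact ⟨(Prod.mk.injEq _ _ _ _ ▸ hnuc).1.symm ▸ rfl, by
          cases hnuc; rfl⟩
      rcases hnuc0 with ⟨hn, hr2⟩
      rw [step1]
      simp [dwA_loop, dwFinish, dwB_loop, hcons, hnuc, hn, hr2]
    · -- r1 starts with a vowel v
      have hv : isV v = true := by
        have := takeB_snd_head false rest v r1t (by rw [hcons, hr1e])
        revert this; cases isV v <;> simp
      have hconsne : cons ≠ [] := by
        intro hce
        rcases hre : rest with _ | ⟨c, cs⟩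
        · rw [hre] at hr; rw [hce] at hr; simp at hr; rw [hr1e] at hr; simp at hr
        · have hcf : isV c = false := hhead c cs hre
          rw [hre, hce] at hr; simp only [List.nil_append] at hr
          rw [hr1e] at hr
          have hcv : c = v := by injection hr
          rw [hcv, hv] at hcf; simp at hcf
    -- consume the vowel run from flag 1
      have hnucne : nuc ≠ [] := by
        have := takeB_fst_ne true v r1t hv
        rw [← hr1e, hnuc] at this; exact this
      have step2 : dwA_loop r1 pieces onset cons [] 1 =
          dwA_loop r2 pieces onset cons nuc 2 := by
        rw [hr1]
        rcases hne : nuc with _ | ⟨u, ut⟩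
        · exact absurd hne hnucne
        · have hu : isV u = true := hnucall u (by simp [hne])
          simp only [List.cons_append, dwA_loop, hu, if_true]
          norm_num
          have := dwA_vowel2 ut (fun d hd => hnucall d (by simp [hne, hd])) r2 pieces onset cons [u]
          simpa using this
      rw [step1, if_neg hconsne, step2]
      rcases hr2e : r2 with _ | ⟨w, r2t⟩
      · -- r2 = [] : finished
        simp [dwA_loop, dwFinish, dwB_loop, hcons, hnuc, hr2e]
      · -- r2 starts with a consonant: A flushes a piece; recurse
        have hw : isV w = false := by
          have := takeB_snd_head true r1 w r2t (by rw [hnuc, hr2e])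
          revert this; cases isV w <;> simp
        have stepF : dwA_loop (w :: r2t) pieces onset cons nuc 2 =
            dwA_loop r2t (pieces ++ [(String.ofList onset, String.ofList cons, String.ofList nuc)]) nuc [w] [] 1 := by
          simp [dwA_loop, hw]
        have stepG : dwA_loop (w :: r2t) (pieces ++ [(String.ofList onset, String.ofList cons, String.ofList nuc)]) nuc [] [] 1 =
            dwA_loop r2t (pieces ++ [(String.ofList onset, String.ofList cons, String.ofList nuc)]) nuc [w] [] 1 := by
          simp [dwA_loop, hw]
        have hlen2 : (w :: r2t).length ≤ n := by
          rw [← hr2e]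
          have h1 := congrArg List.length hr
          have h2 := congrArg List.length hr1
          rcases hce : cons with _ | ⟨d, ds⟩
          · exact absurd hce hconsne
          · rw [hce] at h1; simp at h1 h2; omega
        have hih := ih (w :: r2t) hlen2 (pieces ++ [(String.ofList onset, String.ofList cons, String.ofList nuc)]) nuc 1 (by omega)
          (by intro c cs' hc; cases hc; exact hw)
        rw [stepF, ← stepG, hih]
        conv_rhs => rw [dwB_loop]
        simp [hcons, hnuc, hr2e]

theorem divide_word_eq (word : String) : divide_word word = divide_word_alt word := by
  unfold divide_word divide_word_alt
  rcases hon : takeB true word.toList with ⟨onset, rest⟩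
  have hsplit : word.toList = onset ++ rest := by
    have := takeB_append true word.toList; rw [hon] at this; exact this.symm
  have honall : ∀ c ∈ onset, isV c = true := by
    intro c hc; have := takeB_fst_all true word.toList; rw [hon] at this; exact this c hc
  have h0 : dwA_loop word.toList [] [] [] [] 0 = dwA_loop rest [] onset [] [] 0 := by
    rw [hsplit]
    have := dwA_vowel0 onset honall rest [] [] [] []
    simpa using this
  have hhead : ∀ c cs', rest = c :: cs' → isV c = false := by
    intro c cs' hc
    have := takeB_snd_head true word.toList c cs' (by rw [hon, hc])
    revert this; cases isV c <;> simp
  have := dwA_main rest.length rest (le_refl _) [] onset 0 (Or.inl rfl) hhead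
  simp only [dwFinish] at this
  simp [h0, this]

-- ===== VERDICT (by name: the statement is the Claim_ definition above) =====
theorem divide_word_spec : Claim_equal_divide_word := by
  intro word _
  unfold Spec_divide_word
  exact divide_word_eq word
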